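-- pv_equiv track=rewrite | github.com/baubrun/Challenges-PY | Challenges/box_sequence.py | box_seq
-- ===== SOURCE A (Python) =====
-- def box_seq(step):
--     s = 0
--     if step == 0:
--         return 0
--     for i in range(1, step + 1):
--         if i % 2 == 1:
--             s += 3
--         elif i % 2 == 0:
--             s -= 1
--     return s
-- ===== SOURCE B (Python) =====
-- def box_seq(step):
--     if step <= 0:
--         return 0
--     return 3 * ((step + 1) // 2) - step // 2
-- ===== Notes on version B (the rewrite author's own statement) =====
-- stated objective: faster
-- what changed: Replaces the O(step) loop adding 3 per odd and subtracting 1 per even with the closed-form 3*((step+1)//2) - step//2.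
import Mathlib
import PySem

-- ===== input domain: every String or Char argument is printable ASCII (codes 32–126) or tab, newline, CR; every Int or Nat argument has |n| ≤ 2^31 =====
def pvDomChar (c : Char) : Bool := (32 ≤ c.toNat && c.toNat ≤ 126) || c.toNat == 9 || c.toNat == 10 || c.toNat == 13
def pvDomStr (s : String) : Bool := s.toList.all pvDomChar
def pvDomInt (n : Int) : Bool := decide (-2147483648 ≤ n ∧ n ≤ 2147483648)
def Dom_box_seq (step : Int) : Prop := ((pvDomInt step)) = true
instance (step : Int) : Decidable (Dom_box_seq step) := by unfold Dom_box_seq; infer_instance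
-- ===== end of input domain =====

-- B replaces A's O(step) parity loop with the closed form 3*((step+1)//2) - step//2 (objective: faster).

-- ===== PORT A =====
def box_seq (step : Int) : Int :=
  let s : Int := 0
  if step == 0 then 0
  else
    (PySem.List.pyRange 1 (step + 1) 1).foldl
      (fun s i =>
        if PySem.Int.mod i 2 == 1 then s + 3
        else if PySem.Int.mod i 2 == 0 then s - 1
        else s) s

-- ===== PORT B =====
def box_seq_alt (step : Int) : Int :=
  if step ≤ 0 then 0
  else 3 * PySem.Int.floordiv (step + 1) 2 - PySem.Int.floordiv step 2

-- ===== PRECONDITION & SPEC =====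
def Spec_box_seq (step : Int) (out : Int) : Prop := out = box_seq_alt step
instance (step : Int) (out : Int) : Decidable (Spec_box_seq step out) := by unfold Spec_box_seq; infer_instance

-- ===== CLAIM (what is proved, stated in full; the proofs are below) =====
def Claim_equal_box_seq : Prop := ∀ (step : Int), Dom_box_seq step → Spec_box_seq step (box_seq step)

-- ===== LEMMAS AND PROOFS =====

def pvBody (s i : Int) : Int :=
  if PySem.Int.mod i 2 == 1 then s + 3
  else if PySem.Int.mod i 2 == 0 then s - 1
  else s

theorem pvLoop_closed (n : Nat) :
    (PySem.List.pyRange 1 ((n : Int) + 1) 1).foldl pvBody 0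
      = 3 * (((n : Int) + 1) / 2) - (n : Int) / 2 := by
  induction n with
  | zero => simp [PySem.List.pyRange_one_eq_nil]
  | succ m ih =>
    have h : ((m : Int) + 1 + 1) = ((m : Int) + 1) + 1 := by ring
    rw [show ((m + 1 : Nat) : Int) + 1 = ((m : Int) + 1) + 1 by push_cast; ring,
        PySem.List.pyRange_one_succ_right (by omega)]
    rw [List.foldl_append, ih]
    simp only [List.foldl, pvBody, PySem.Int.mod]
    have hf : ((m : Int) + 1).fmod 2 = ((m : Int) + 1) % 2 :=
      by rw [Int.fmod_eq_emod]; simp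
    rcases Int.emod_two_eq ((m : Int) + 1) with h2 | h2 <;>
      simp only [hf, h2] <;> simp <;> push_cast <;> omega

theorem box_seq_eq (step : Int) : box_seq step = box_seq_alt step := by
  unfold box_seq box_seq_alt
  by_cases h0 : step ≤ 0
  · rcases eq_or_lt_of_le h0 with h | h
    · simp [h.symm]
    · have : step ≠ 0 := by omega
      simp [this, PySem.List.pyRange_one_eq_nil (by omega : step + 1 ≤ 1), h0]
  · have hne : step ≠ 0 := by omega
    have hn : ∃ n : Nat, step = (n : Int) := ⟨step.toNat, by omega⟩
    obtain ⟨n, rfl⟩ := hn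
    rw [if_neg (by simpa using hne), if_neg h0]
    show (PySem.List.pyRange 1 ((n : Int) + 1) 1).foldl pvBody 0 = _
    rw [pvLoop_closed, PySem.Int.floordiv_eq_ediv_of_pos (by omega),
        PySem.Int.floordiv_eq_ediv_of_pos (by omega)]

-- ===== VERDICT (by name: the statement is the Claim_ definition above) =====
theorem box_seq_spec : Claim_equal_box_seq := by
  intro step _
  unfold Spec_box_seq
  exact box_seq_eq step
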